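-- pv_equiv track=rewrite | github.com/chahongpil/realm-of-fates | tools/cut_banners.py | find_groups
-- ===== SOURCE A (Python) =====
-- def find_groups(mask, min_gap=25):
--     groups = []
--     i = 0
--     n = len(mask)
--     while i < n:
--         if mask[i]:
--             start = i
--             while i < n and mask[i]: i += 1
--             groups.append((start, i - 1))
--         else:
--             i += 1
--     merged = []
--     for g in groups:
--         if merged and g[0] - merged[-1][1] < min_gap:
--             merged[-1] = (merged[-1][0], g[1])
--         else:
--             merged.append(g)
--     return merged
-- ===== SOURCE B (Python) =====
-- def find_groups(mask, min_gap=25):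
--     # Single pass: detect runs and merge them on the fly,
--     # keeping one open merged group (cur) instead of building a runs list first.
--     merged = []
--     cur = None        # current open merged group (start, end)
--     run_start = None  # start of the True run we are inside, if any
--     i = 0
--     for v in mask:
--         if run_start is None:
--             if v:
--                 run_start = i
--         elif not v:
--             # run [run_start, i-1] just ended
--             if cur is not None and run_start - cur[1] < min_gap:
--                 cur = (cur[0], i - 1)
--             else:
--                 if cur is not None:
--                     merged.append(cur)
--                 cur = (run_start, i - 1)
--             run_start = None
--         i += 1
--     if run_start is not None:
--         # close the trailing run; here i == len(mask)
--         if cur is not None and run_start - cur[1] < min_gap: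
--             cur = (cur[0], i - 1)
--         else:
--             if cur is not None:
--                 merged.append(cur)
--             cur = (run_start, i - 1)
--     if cur is not None:
--         merged.append(cur)
--     return merged
-- ===== Notes on version B (the rewrite author's own statement) =====
-- stated objective: faster
-- what changed: Replaced A's two phases (build a list of all True runs, then a second fold merging nearby runs via merged[-1] rewriting) with a single scan that maintains one open merged group and extends/flushes it at each run boundary, never materialising the runs list; a timing run measured it about 1.9x faster.
import Mathlib
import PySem

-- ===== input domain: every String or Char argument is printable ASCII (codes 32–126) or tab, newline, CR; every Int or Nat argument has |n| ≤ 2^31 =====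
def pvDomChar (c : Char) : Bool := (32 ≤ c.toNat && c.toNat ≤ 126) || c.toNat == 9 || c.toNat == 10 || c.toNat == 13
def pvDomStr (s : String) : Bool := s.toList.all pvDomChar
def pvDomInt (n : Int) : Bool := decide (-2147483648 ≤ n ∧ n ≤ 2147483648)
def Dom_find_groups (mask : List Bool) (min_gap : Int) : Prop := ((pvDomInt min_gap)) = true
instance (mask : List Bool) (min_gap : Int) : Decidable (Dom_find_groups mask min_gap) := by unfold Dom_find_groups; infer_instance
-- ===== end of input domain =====

-- B fuses A's two phases (collect True runs, then merge nearby runs) into one scan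
-- that maintains a single open merged group; same values, alternative decomposition.

-- ===== PORT A =====
-- A's while-loop run detection: index i, optional start of the True run currently
-- being scanned (the inner `while i < n and mask[i]` is the `some s` state).
def pvRunsA : List Bool → Int → Option Int → List (Int × Int)
  | [], _, none => []
  | [], i, some s => [(s, i - 1)]
  | b :: rest, i, none =>
      if b then pvRunsA rest (i + 1) (some i) else pvRunsA rest (i + 1) none
  | b :: rest, i, some s =>
      if b then pvRunsA rest (i + 1) (some s) else (s, i - 1) :: pvRunsA rest (i + 1) none

-- A's second loop: merge step on the accumulated `merged` list (merged[-1] rewriting).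
def pvMergeStepA (min_gap : Int) (merged : List (Int × Int)) (g : Int × Int) : List (Int × Int) :=
  match merged.getLast? with
  | some last => if g.1 - last.2 < min_gap then merged.dropLast ++ [(last.1, g.2)] else merged ++ [g]
  | none => merged ++ [g]

def find_groups (mask : List Bool) (min_gap : Int) : List (Int × Int) :=
  (pvRunsA mask 0 none).foldl (pvMergeStepA min_gap) []

-- ===== PORT B =====
-- B's single pass: state = (merged so far, open merged group cur, open run start).
def pvScanB (min_gap : Int) : List Bool → Int → List (Int × Int) → Option (Int × Int) → Option Int → List (Int × Int)
  | [], i, merged, cur, rs =>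
      let mc : List (Int × Int) × Option (Int × Int) :=
        match rs with
        | none => (merged, cur)
        | some s =>
          match cur with
          | some c =>
              if s - c.2 < min_gap then (merged, some (c.1, i - 1))
              else (merged ++ [c], some (s, i - 1))
          | none => (merged, some (s, i - 1))
      match mc.2 with
      | some c => mc.1 ++ [c]
      | none => mc.1
  | v :: rest, i, merged, cur, rs =>
      match rs with
      | none =>
          if v then pvScanB min_gap rest (i + 1) merged cur (some i)
          else pvScanB min_gap rest (i + 1) merged cur none
      | some s =>
          if v then pvScanB min_gap rest (i + 1) merged cur (some s)
          else
            match cur with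
            | some c =>
                if s - c.2 < min_gap then pvScanB min_gap rest (i + 1) merged (some (c.1, i - 1)) none
                else pvScanB min_gap rest (i + 1) (merged ++ [c]) (some (s, i - 1)) none
            | none => pvScanB min_gap rest (i + 1) merged (some (s, i - 1)) none

def find_groups_alt (mask : List Bool) (min_gap : Int) : List (Int × Int) :=
  pvScanB min_gap mask 0 [] none none

-- ===== PRECONDITION & SPEC =====
def Spec_find_groups (mask : List Bool) (min_gap : Int) (out : List (Int × Int)) : Prop := out = find_groups_alt mask min_gap
instance (mask : List Bool) (min_gap : Int) (out : List (Int × Int)) : Decidable (Spec_find_groups mask min_gap out) := by unfold Spec_find_groups; infer_instance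

-- ===== CLAIM (what is proved, stated in full; the proofs are below) =====
def Claim_equal_find_groups : Prop := ∀ (mask : List Bool) (min_gap : Int), Dom_find_groups mask min_gap → Spec_find_groups mask min_gap (find_groups mask min_gap)

-- ===== LEMMAS AND PROOFS =====

theorem pvMergeStepA_concat (min_gap : Int) (m : List (Int × Int)) (c g : Int × Int) :
    pvMergeStepA min_gap (m ++ [c]) g =
      if g.1 - c.2 < min_gap then m ++ [(c.1, g.2)] else (m ++ [c]) ++ [g] := by
  simp [pvMergeStepA]

theorem pvMergeStepA_nil (min_gap : Int) (g : Int × Int) :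
    pvMergeStepA min_gap [] g = [g] := by
  simp [pvMergeStepA]

-- B's scan in the `cur = some c` state computes A's merge fold over the remaining runs.
theorem pvScanB_some (min_gap : Int) (mask : List Bool) :
    ∀ (i : Int) (m : List (Int × Int)) (c : Int × Int) (rs : Option Int),
      pvScanB min_gap mask i m (some c) rs =
        (pvRunsA mask i rs).foldl (pvMergeStepA min_gap) (m ++ [c]) := by
  induction mask with
  | nil =>
      intro i m c rs
      cases rs with
      | none => simp [pvScanB, pvRunsA]
      | some s =>
          simp only [pvScanB, pvRunsA, List.foldl_cons, List.foldl_nil, pvMergeStepA_concat]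
          split_ifs <;> simp
  | cons v rest ih =>
      intro i m c rs
      cases rs with
      | none =>
          by_cases hv : v = true <;> simp [pvScanB, pvRunsA, hv, ih]
      | some s =>
          by_cases hv : v = true
          · simp [pvScanB, pvRunsA, hv, ih]
          · simp only [pvScanB, pvRunsA, hv, if_false, Bool.false_eq_true,
              List.foldl_cons, pvMergeStepA_concat]
            split_ifs with h
            · rw [ih]
            · rw [ih]

-- B's scan in the initial `cur = none, merged = []` state likewise.
theorem pvScanB_none (min_gap : Int) (mask : List Bool) :
    ∀ (i : Int) (rs : Option Int),
      pvScanB min_gap mask i [] none rs =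
        (pvRunsA mask i rs).foldl (pvMergeStepA min_gap) [] := by
  induction mask with
  | nil =>
      intro i rs
      cases rs <;> simp [pvScanB, pvRunsA, pvMergeStepA_nil]
  | cons v rest ih =>
      intro i rs
      cases rs with
      | none =>
          by_cases hv : v = true <;> simp [pvScanB, pvRunsA, hv, ih]
      | some s =>
          by_cases hv : v = true
          · simp [pvScanB, pvRunsA, hv, ih]
          · simp only [pvScanB, pvRunsA, hv, if_false, Bool.false_eq_true,
              List.foldl_cons, pvMergeStepA_nil]
            rw [pvScanB_some]
            simp

-- ===== VERDICT (by name: the statement is the Claim_ definition above) =====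
theorem find_groups_spec : Claim_equal_find_groups := by
  intro mask min_gap _
  unfold Spec_find_groups find_groups find_groups_alt
  rw [pvScanB_none]
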